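-- pv_equiv track=rewrite | github.com/arumajirou/lib_ana | CLE_V6_streamlit_pkg/src/v6/core/hierarchy_v6.py | auto_depth
-- ===== SOURCE A (Python) =====
-- from typing import List, Tuple
--
-- def split_segments(path: str) -> List[str]:
--     return [p for p in (path or "").split(".") if p]
--
-- def auto_depth(module_paths: List[str], max_depth: int = 8, target_groups: int = 60, target_avg: int = 200) -> int:
--     n = len(module_paths)
--     if n <= 0:
--         return 1
--     best = 1
--     for depth in range(1, max_depth + 1):
--         groups = {}
--         for m in module_paths:
--             segs = split_segments(m)
--             key = ".".join(segs[:depth])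
--             groups[key] = groups.get(key, 0) + 1
--         g = len(groups)
--         avg = int(round(n / max(g, 1)))
--         if g <= target_groups and avg <= target_avg:
--             best = depth
--             break
--         best = depth
--     return best
-- ===== SOURCE B (Python) =====
-- from typing import List
--
-- def split_segments(path: str) -> List[str]:
--     return [p for p in (path or "").split(".") if p]
--
-- def auto_depth(module_paths: List[str], max_depth: int = 8, target_groups: int = 60, target_avg: int = 200) -> int:
--     n = len(module_paths)
--     if n <= 0 or max_depth < 1:
--         return 1
--     segs_list = [split_segments(m) for m in module_paths]
--     # prefix keys stabilize at the longest segment list: depths beyond it give the same grouping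
--     longest = 1
--     for segs in segs_list:
--         longest = max(longest, len(segs))
--     cap = min(max_depth, longest)
--     depth_groups = {d: {} for d in range(1, cap + 1)}
--     for segs in segs_list:
--         for d in range(1, cap + 1):
--             tab = depth_groups[d]
--             key = ".".join(segs[:d])
--             tab[key] = tab.get(key, 0) + 1
--     for d in range(1, cap + 1):
--         g = len(depth_groups[d])
--         avg = int(round(n / max(g, 1)))
--         if g <= target_groups and avg <= target_avg:
--             return d
--     return max_depth
-- ===== Notes on version B (the rewrite author's own statement) =====
-- stated objective: alternative
-- what changed: B splits each path once, caps the depth range at the longest segment list (prefix groupings stabilize beyond it), builds in a single pass over the modules one per-depth prefix-count table, and reads that table in a separate scan, instead of A's per-depth rebuild of the groups dict with re-splitting of every path at every depth.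
import Mathlib
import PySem

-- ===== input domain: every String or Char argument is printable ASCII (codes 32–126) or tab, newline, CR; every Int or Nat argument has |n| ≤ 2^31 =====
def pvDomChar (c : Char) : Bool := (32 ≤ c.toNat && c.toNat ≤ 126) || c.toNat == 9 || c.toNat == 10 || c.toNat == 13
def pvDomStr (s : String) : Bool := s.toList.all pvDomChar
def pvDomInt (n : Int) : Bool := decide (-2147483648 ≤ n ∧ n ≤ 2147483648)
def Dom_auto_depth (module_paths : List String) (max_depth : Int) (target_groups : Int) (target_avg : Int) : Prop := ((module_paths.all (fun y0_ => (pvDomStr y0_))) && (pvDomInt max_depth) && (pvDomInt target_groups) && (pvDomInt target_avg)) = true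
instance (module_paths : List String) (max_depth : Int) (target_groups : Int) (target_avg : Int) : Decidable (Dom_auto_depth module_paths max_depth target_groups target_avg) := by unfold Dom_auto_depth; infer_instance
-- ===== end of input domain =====

-- B builds one per-depth prefix-count table in a single pass over the modules (each path split
-- once) and reads it in a separate scan over depths, instead of A's per-depth rebuild; objective: alternative decomposition.

-- ===== PORT A =====
-- split_segments: (path or "").split(".") filtered by truthiness; for path = "" the 'or' yields "" again,
-- so it is path.split(".") with empty pieces dropped (PySem.Str.splitOn is exact for sep = ".").
-- sep = "." is nonempty, so PySem.Str.split? is always 'some'; the getD [] default is never taken.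
def pySplitSegments (path : String) : List String :=
  ((PySem.Str.split? path ".").getD []).filter (fun p => p != "")

-- int(round(n / max(g, 1))) as exact integer arithmetic (round-half-even of the rational n/max(g,1)).
-- Exact for 0 ≤ n < 2^52: float division is correctly rounded, so with numerator below 2^52 the double
-- cannot cross the nearest half-integer boundary, and exact halves are representable; here n = len(list) ≤ 2^31.
def pyRoundDiv (n g : Int) : Int :=
  let g' := max g 1
  let q := PySem.Int.floordiv n g'
  let r := n - q * g'
  if 2 * r < g' then q
  else if 2 * r > g' then q + 1
  else if q % 2 = 0 then q else q + 1

-- the inner 'for m in module_paths' loop of A at a fixed depth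
def autoDepthGroups (module_paths : List String) (depth : Int) : PySem.Dict String Int :=
  module_paths.foldl (fun groups m =>
    let segs := pySplitSegments m
    let key := PySem.Str.join "." (PySem.List.slice segs none (some depth))
    groups.insert key (groups.getD key 0 + 1)) PySem.Dict.empty

-- A's 'for depth in range(1, max_depth+1)' loop with the running 'best' and the break
def aLoop (module_paths : List String) (n target_groups target_avg : Int) :
    List Int → Int → Int
  | [], best => best
  | depth :: rest, _best =>
      let groups := autoDepthGroups module_paths depth
      let g : Int := groups.size
      let avg := pyRoundDiv n g
      if g ≤ target_groups ∧ avg ≤ target_avg then depth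
      else aLoop module_paths n target_groups target_avg rest depth

def auto_depth (module_paths : List String) (max_depth : Int) (target_groups : Int) (target_avg : Int) : Int :=
  let n : Int := module_paths.length
  if n ≤ 0 then 1
  else aLoop module_paths n target_groups target_avg (PySem.List.pyRange 1 (max_depth + 1) 1) 1

-- ===== PORT B =====
-- B's final scan 'for d in range(1, max_depth+1): … return d' with fallthrough 'return max_depth'
def bScan (n target_groups target_avg : Int) (table : PySem.Dict Int (PySem.Dict String Int))
    (max_depth : Int) : List Int → Int
  | [] => max_depth
  | d :: rest =>
      let g : Int := (table.getD d PySem.Dict.empty).size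
      let avg := pyRoundDiv n g
      if g ≤ target_groups ∧ avg ≤ target_avg then d
      else bScan n target_groups target_avg table max_depth rest

def auto_depth_alt (module_paths : List String) (max_depth : Int) (target_groups : Int) (target_avg : Int) : Int :=
  let n : Int := module_paths.length
  if n ≤ 0 ∨ max_depth < 1 then 1
  else
    let segsList := module_paths.map (fun m => pySplitSegments m)
    -- running max of the segment counts; prefix groupings stabilize beyond it
    let longest : Int := segsList.foldl (fun acc s => max acc (s.length : Int)) 1
    let cap := min max_depth longest
    let ds := PySem.List.pyRange 1 (cap + 1) 1
    -- {d: {} for d in range(1, cap+1)}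
    let init : PySem.Dict Int (PySem.Dict String Int) :=
      ds.foldl (fun t d => t.insert d PySem.Dict.empty) PySem.Dict.empty
    -- single pass over the modules, updating every depth's table
    -- (depth_groups[d] always exists; getD with empty default is exact here)
    let table := segsList.foldl (fun t segs =>
        ds.foldl (fun t d =>
          let key := PySem.Str.join "." (PySem.List.slice segs none (some d))
          let tab := t.getD d PySem.Dict.empty
          t.insert d (tab.insert key (tab.getD key 0 + 1))) t) init
    bScan n target_groups target_avg table max_depth ds

-- ===== PRECONDITION & SPEC =====
def Spec_auto_depth (module_paths : List String) (max_depth : Int) (target_groups : Int) (target_avg : Int) (out : Int) : Prop := out = auto_depth_alt module_paths max_depth target_groups target_avg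
instance (module_paths : List String) (max_depth : Int) (target_groups : Int) (target_avg : Int) (out : Int) : Decidable (Spec_auto_depth module_paths max_depth target_groups target_avg out) := by unfold Spec_auto_depth; infer_instance

-- ===== CLAIM (what is proved, stated in full; the proofs are below) =====
def Claim_equal_auto_depth : Prop := ∀ (module_paths : List String) (max_depth : Int) (target_groups : Int) (target_avg : Int), Dom_auto_depth module_paths max_depth target_groups target_avg → Spec_auto_depth module_paths max_depth target_groups target_avg (auto_depth module_paths max_depth target_groups target_avg)

-- ===== LEMMAS AND PROOFS =====

-- one inner depth-loop pass of B: effect on the table read back at a key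
theorem bInner_getD (ds : List Int) (hnd : ds.Nodup)
    (f : Int → PySem.Dict String Int → PySem.Dict String Int)
    (t : PySem.Dict Int (PySem.Dict String Int)) (d0 : Int) :
    (ds.foldl (fun t d => t.insert d (f d (t.getD d PySem.Dict.empty))) t).getD d0 PySem.Dict.empty
      = if d0 ∈ ds then f d0 (t.getD d0 PySem.Dict.empty) else t.getD d0 PySem.Dict.empty := by
  induction ds generalizing t with
  | nil => simp
  | cons d ds ih =>
    have hnd' : ds.Nodup := hnd.of_cons
    have hdns : d ∉ ds := (List.nodup_cons.mp hnd).1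
    simp only [List.foldl_cons]
    rw [ih hnd']
    by_cases h0 : d0 ∈ ds
    · have hne : d0 ≠ d := fun h => hdns (h ▸ h0)
      simp [h0, PySem.Dict.getD_insert, hne]
    · by_cases hed : d0 = d
      · subst hed; simp [h0]
      · simp [h0, hed, PySem.Dict.getD_insert]

theorem aLoop_char (module_paths : List String) (n tg ta : Int) (ds : List Int) (best : Int) :
    aLoop module_paths n tg ta ds best
      = match ds.find? (fun d =>
          decide ((autoDepthGroups module_paths d).size ≤ tg ∧
                  pyRoundDiv n ((autoDepthGroups module_paths d).size : Int) ≤ ta)) with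
        | some d => d
        | none => ds.getLast?.getD best := by
  induction ds generalizing best with
  | nil => simp [aLoop]
  | cons d rest ih =>
    by_cases h : (autoDepthGroups module_paths d).size ≤ tg ∧
        pyRoundDiv n ((autoDepthGroups module_paths d).size : Int) ≤ ta
    · rw [List.find?_cons_of_pos (by simpa using h)]
      simp [aLoop, h]
    · rw [List.find?_cons_of_neg (by simpa using h)]
      simp only [aLoop, h, if_false]
      rw [ih d]
      cases hf : rest.find? (fun d =>
          decide ((autoDepthGroups module_paths d).size ≤ tg ∧
                  pyRoundDiv n ((autoDepthGroups module_paths d).size : Int) ≤ ta)) with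
      | some d' => rfl
      | none =>
        cases rest with
        | nil => simp
        | cons r rs =>
          cases hg : (r :: rs).getLast? with
          | none => simp at hg
          | some y =>
            rw [List.getLast?_cons_cons, hg]
            simp

theorem bScan_char (n tg ta md : Int) (table : PySem.Dict Int (PySem.Dict String Int))
    (module_paths : List String) (ds : List Int)
    (ht : ∀ d ∈ ds, table.getD d PySem.Dict.empty = autoDepthGroups module_paths d) :
    bScan n tg ta table md ds
      = match ds.find? (fun d =>
          decide ((autoDepthGroups module_paths d).size ≤ tg ∧
                  pyRoundDiv n ((autoDepthGroups module_paths d).size : Int) ≤ ta)) with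
        | some d => d
        | none => md := by
  induction ds with
  | nil => simp [bScan]
  | cons d rest ih =>
    have hd := ht d (by simp)
    by_cases h : (autoDepthGroups module_paths d).size ≤ tg ∧
        pyRoundDiv n ((autoDepthGroups module_paths d).size : Int) ≤ ta
    · rw [List.find?_cons_of_pos (by simpa using h)]
      simp [bScan, hd, h]
    · rw [List.find?_cons_of_neg (by simpa using h)]
      simp only [bScan, hd, h, if_false]
      exact ih (fun d' hd' => ht d' (by simp [hd']))

-- B's table, read at any depth of the range, is exactly A's per-depth groups dict
theorem table_getD (module_paths : List String) (ds : List Int) (hnd : ds.Nodup) (d0 : Int)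
    (hd0 : d0 ∈ ds) :
    ((module_paths.map (fun m => pySplitSegments m)).foldl (fun t segs =>
        ds.foldl (fun t d =>
          let key := PySem.Str.join "." (PySem.List.slice segs none (some d))
          let tab := t.getD d PySem.Dict.empty
          t.insert d (tab.insert key (tab.getD key 0 + 1))) t)
      (ds.foldl (fun t d => t.insert d PySem.Dict.empty)
        (PySem.Dict.empty : PySem.Dict Int (PySem.Dict String Int)))).getD d0 PySem.Dict.empty
      = autoDepthGroups module_paths d0 := by
  have init_getD :
      ((ds.foldl (fun t d => t.insert d PySem.Dict.empty)
        (PySem.Dict.empty : PySem.Dict Int (PySem.Dict String Int)))).getD d0 PySem.Dict.empty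
        = PySem.Dict.empty := by
    rw [bInner_getD ds hnd (fun _ _ => PySem.Dict.empty)]
    by_cases h : d0 ∈ ds <;> simp [h]
  -- general shape: folding the module list over ANY starting table
  have main : ∀ (l : List (List String)) (t : PySem.Dict Int (PySem.Dict String Int)),
      (l.foldl (fun t segs =>
        ds.foldl (fun t d =>
          let key := PySem.Str.join "." (PySem.List.slice segs none (some d))
          let tab := t.getD d PySem.Dict.empty
          t.insert d (tab.insert key (tab.getD key 0 + 1))) t) t).getD d0 PySem.Dict.empty
      = l.foldl (fun tab segs =>
          let key := PySem.Str.join "." (PySem.List.slice segs none (some d0))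
          tab.insert key (tab.getD key 0 + 1)) (t.getD d0 PySem.Dict.empty) := by
    intro l
    induction l with
    | nil => intro t; simp
    | cons segs l ih =>
      intro t
      simp only [List.foldl_cons]
      rw [ih]
      rw [bInner_getD ds hnd
        (fun d tab =>
          let key := PySem.Str.join "." (PySem.List.slice segs none (some d))
          tab.insert key (tab.getD key 0 + 1)) t d0]
      simp [hd0]
  rw [main, init_getD, autoDepthGroups, List.foldl_map]

-- ===== VERDICT (by name: the statement is the Claim_ definition above) =====
-- a slice xs[:d] past the length is the whole list
theorem slice_full {α : Type} (xs : List α) (d : Int) (h : (xs.length : Int) ≤ d) :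
    PySem.List.slice xs none (some d) = xs := by
  have h0 : 0 ≤ d := le_trans (Int.natCast_nonneg _) h
  obtain ⟨k, rfl⟩ : ∃ k : ℕ, d = (k : Int) := ⟨d.toNat, (Int.toNat_of_nonneg h0).symm⟩
  rw [PySem.List.slice_to_natCast]
  exact List.take_of_length_le (by exact_mod_cast h)

-- the per-depth grouping dict stabilizes once the depth reaches every segment count
theorem groups_stable (module_paths : List String) (c d : Int)
    (h : ∀ m ∈ module_paths, ((pySplitSegments m).length : Int) ≤ c) (hcd : c ≤ d) :
    autoDepthGroups module_paths d = autoDepthGroups module_paths c := by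
  unfold autoDepthGroups
  apply PySem.List.foldl_congr_mem
  intro acc m hm
  simp only [slice_full _ d (le_trans (h m hm) hcd), slice_full _ c (h m hm)]

theorem auto_depth_spec : Claim_equal_auto_depth := by
  intro module_paths max_depth tg ta _hdom
  unfold Spec_auto_depth auto_depth auto_depth_alt
  by_cases hn : (module_paths.length : Int) ≤ 0
  · have he : module_paths = [] := by
      cases module_paths with
      | nil => rfl
      | cons a l => simp at hn; omega
    simp [he]
  · by_cases hmd : max_depth < 1
    · have hnil : PySem.List.pyRange 1 (max_depth + 1) 1 = [] :=
        PySem.List.pyRange_one_eq_nil (by omega)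
      simp [hmd, hnil, aLoop]
    · simp only [hn, hmd, if_false]
      set segsList := module_paths.map (fun m => pySplitSegments m) with hsegs
      set longest := segsList.foldl (fun acc s => max acc (s.length : Int)) 1 with hlong
      set cap := min max_depth longest with hcap
      have hmax := PySem.List.le_foldl_max_int segsList (fun s => (s.length : Int)) 1
      have hl1 : 1 ≤ longest := hmax.1
      have hlmem : ∀ m ∈ module_paths, ((pySplitSegments m).length : Int) ≤ longest := by
        intro m hm
        exact hmax.2 _ (by rw [hsegs]; exact List.mem_map_of_mem hm)
      have hcap1 : 1 ≤ cap := by omega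
      have hcapmd : cap ≤ max_depth := by omega
      set ds := PySem.List.pyRange 1 (cap + 1) 1 with hds
      have hnd : ds.Nodup := PySem.List.nodup_pyRange_one 1 (cap + 1)
      have ht : ∀ d ∈ ds,
          (segsList.foldl (fun t segs =>
            ds.foldl (fun t d =>
              let key := PySem.Str.join "." (PySem.List.slice segs none (some d))
              let tab := t.getD d PySem.Dict.empty
              t.insert d (tab.insert key (tab.getD key 0 + 1))) t)
          (ds.foldl (fun t d => t.insert d PySem.Dict.empty)
            (PySem.Dict.empty : PySem.Dict Int (PySem.Dict String Int)))).getD d PySem.Dict.empty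
          = autoDepthGroups module_paths d := by
        intro d hd
        rw [hsegs]
        exact table_getD module_paths ds hnd d hd
      rw [aLoop_char, bScan_char (module_paths := module_paths) _ _ _ _ _ ds ht]
      have hsplitA : PySem.List.pyRange 1 (max_depth + 1) 1 = ds ++ PySem.List.pyRange (cap + 1) (max_depth + 1) 1 := by
        rw [hds]; exact PySem.List.pyRange_one_append 1 (cap + 1) (max_depth + 1) (by omega) (by omega)
      rw [hsplitA, List.find?_append]
      cases hfB : ds.find? (fun d =>
          decide ((autoDepthGroups module_paths d).size ≤ tg ∧
                  pyRoundDiv (module_paths.length : Int) ((autoDepthGroups module_paths d).size : Int) ≤ ta)) with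
      | some d => simp
      | none =>
        have hrest : (PySem.List.pyRange (cap + 1) (max_depth + 1) 1).find? (fun d =>
            decide ((autoDepthGroups module_paths d).size ≤ tg ∧
                    pyRoundDiv (module_paths.length : Int) ((autoDepthGroups module_paths d).size : Int) ≤ ta)) = none := by
          apply List.find?_eq_none.mpr
          intro d hd
          have hdmem := (PySem.List.mem_pyRange_one).mp hd
          by_cases hml : max_depth ≤ longest
          · exfalso; omega
          · have hcl : cap = longest := by omega
            have hpc := List.find?_eq_none.mp hfB cap
              (by rw [hds]; exact (PySem.List.mem_pyRange_one).mpr ⟨hcap1, by omega⟩)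
            have hgd : autoDepthGroups module_paths d = autoDepthGroups module_paths cap := by
              rw [hcl]
              exact groups_stable module_paths longest d hlmem (by omega)
            simpa [hgd] using hpc
        rw [hrest]
        have hlast : (ds ++ PySem.List.pyRange (cap + 1) (max_depth + 1) 1).getLast?.getD 1 = max_depth := by
          rw [← hsplitA]
          have : PySem.List.pyRange 1 (max_depth + 1) 1 = PySem.List.pyRange 1 max_depth 1 ++ [max_depth] :=
            PySem.List.pyRange_one_succ_right (by omega)
          simp [this]
        simpa using hlast
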